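-- pv_equiv track=rewrite | github.com/CorniiDog/lightning_research_database | toolbox.py | zig_zag_range
-- ===== SOURCE A (Python) =====
-- def zig_zag_range(max_value: int, start: int):
--     """
--     Generates an iterator over indices in a zig-zag order within the range [0, max_value).
--
--     The iterator starts at the specified `start` index and then alternates between
--     increasing and decreasing indices. The pattern is:
--
--         start, start + d, start - d, start + 2*d, start - 2*d, ...
--
--     The initial direction is chosen based on the available space toward the range
--     boundaries. If the distance to the upper boundary (max_value - 1) is smaller than
--     the distance to the lower boundary (0), the iterator will first move upward; otherwise,
--     it will move downward.
--
--     Parameters: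
--       max_value (int): The exclusive upper bound for indices (valid indices are 0 to max_value - 1).
--       start (int): The starting index within the range.
--
--     Returns:
--       Iterator[int]: An iterator yielding indices in zig-zag order.
--
--     Example:
--       >>> list(zig_zag_range(10, 5))
--       [5, 6, 4, 7, 3, 8, 2, 9, 1, 0]
--
--       >>> list(zig_zag_range(10, 2))
--       [2, 1, 3, 0, 4, 5, 6, 7, 8, 9]
--
--       >>> list(zig_zag_range(0, 0))
--       []
--     """
--     # Return an empty iterator if max_value is 0.
--     if max_value == 0:
--         return
--
--     if start < 0 or start >= max_value:
--         raise ValueError("start must be within the range [0, max_value)")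
--
--     yield start
--     up_max = max_value - start - 1  # maximum upward steps possible
--     down_max = start              # maximum downward steps possible
--     max_d = max(up_max, down_max)
--
--     # Determine the first direction: if the space upward is smaller, go up first; otherwise, go down.
--     first = 'pos' if up_max < down_max else 'neg'
--
--     for d in range(1, max_d + 1):
--         if first == 'pos':
--             if start + d < max_value:
--                 yield start + d
--             if start - d >= 0:
--                 yield start - d
--         else:
--             if start - d >= 0:
--                 yield start - d
--             if start + d < max_value:
--                 yield start + d
-- ===== SOURCE B (Python) =====
-- def _interleave(first, second):
--     # round-robin merge: take the head of `first`, then continue with the pair swapped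
--     out = []
--     i = j = 0
--     while i < len(first):
--         out.append(first[i])
--         i += 1
--         first, second, i, j = second, first, j, i
--     out.extend(second[j:])
--     return out
--
--
-- def zig_zag_range(max_value: int, start: int):
--     if max_value == 0:
--         return
--     if start < 0 or start >= max_value:
--         raise ValueError("start must be within the range [0, max_value)")
--     yield start
--     up = list(range(start + 1, max_value))
--     down = list(range(start - 1, -1, -1))
--     first, second = (up, down) if max_value - start - 1 < start else (down, up)
--     yield from _interleave(first, second)
-- ===== Notes on version B (the rewrite author's own statement) =====
-- stated objective: alternative
-- what changed: Replaces the single d-counter loop with its two per-direction range conditionals by materialising the upward and downward index runs and interleaving them round-robin with a recursive merge.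
import Mathlib
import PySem

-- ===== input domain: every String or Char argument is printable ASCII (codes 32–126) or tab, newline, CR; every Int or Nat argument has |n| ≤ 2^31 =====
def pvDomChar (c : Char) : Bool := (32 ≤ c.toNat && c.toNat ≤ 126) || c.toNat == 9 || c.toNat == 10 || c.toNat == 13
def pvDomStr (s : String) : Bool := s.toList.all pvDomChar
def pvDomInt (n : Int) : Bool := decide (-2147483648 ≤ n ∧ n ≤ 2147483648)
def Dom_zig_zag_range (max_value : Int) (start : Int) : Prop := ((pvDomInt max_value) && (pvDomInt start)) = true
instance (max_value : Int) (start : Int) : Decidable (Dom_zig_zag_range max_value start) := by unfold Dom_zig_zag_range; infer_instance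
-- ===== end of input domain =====

-- B replaces A's single d-counter loop by materialising the two directional runs and
-- merging them round-robin recursively (alternative decomposition, same cost).
-- Equivalence is about the returned sequence; on inputs where the Python raises
-- ValueError (excluded by Pre_) both ports return [].

-- ===== PORT A =====
def zig_zag_range (max_value : Int) (start : Int) : List Int :=
  if max_value = 0 then []
  else if start < 0 ∨ start ≥ max_value then []  -- Python raises ValueError here (outside Pre_)
  else
    let up_max := max_value - start - 1
    let down_max := start
    let max_d := max up_max down_max
    let first : String := if up_max < down_max then "pos" else "neg"
    (PySem.List.pyRange 1 (max_d + 1) 1).foldl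
      (fun acc d =>
        if first = "pos" then
          let acc := if start + d < max_value then acc ++ [start + d] else acc
          if start - d ≥ 0 then acc ++ [start - d] else acc
        else
          let acc := if start - d ≥ 0 then acc ++ [start - d] else acc
          if start + d < max_value then acc ++ [start + d] else acc)
      [start]

-- ===== PORT B =====
def pvInterleave : List Int → List Int → List Int
  | [], ys => ys
  | x :: xs, ys => x :: pvInterleave ys xs
termination_by xs ys => xs.length + ys.length
decreasing_by simp; omega

def zig_zag_range_alt (max_value : Int) (start : Int) : List Int :=
  if max_value = 0 then []
  else if start < 0 ∨ start ≥ max_value then []  -- Python raises ValueError here (outside Pre_)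
  else
    let up := PySem.List.pyRange (start + 1) max_value 1
    let down := PySem.List.pyRange (start - 1) (-1) (-1)
    let p := if max_value - start - 1 < start then (up, down) else (down, up)
    start :: pvInterleave p.1 p.2

-- ===== PRECONDITION & SPEC =====
-- Pre_ excludes exactly the inputs where Python A raises ValueError
-- (max_value ≠ 0 and start outside [0, max_value)).
def Pre_zig_zag_range (max_value : Int) (start : Int) : Prop :=
  max_value = 0 ∨ (0 ≤ start ∧ start < max_value)
instance (max_value : Int) (start : Int) : Decidable (Pre_zig_zag_range max_value start) := by
  unfold Pre_zig_zag_range; infer_instance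

def pvWitness_zig_zag_range : Int × Int := (10, 5)

def Spec_zig_zag_range (max_value : Int) (start : Int) (out : List Int) : Prop :=
  out = zig_zag_range_alt max_value start
instance (max_value : Int) (start : Int) (out : List Int) :
    Decidable (Spec_zig_zag_range max_value start out) := by
  unfold Spec_zig_zag_range; infer_instance

-- ===== CLAIM (what is proved, stated in full; the proofs are below) =====
def Claim_equal_zig_zag_range : Prop :=
  ∀ (max_value : Int) (start : Int), Dom_zig_zag_range max_value start →
    Pre_zig_zag_range max_value start →
    Spec_zig_zag_range max_value start (zig_zag_range max_value start)

-- ===== LEMMAS AND PROOFS =====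

-- interleave of the shorter list into the longer: zipped pairs then the tail of the longer
theorem pvInterleave_eq (xs : List Int) :
    ∀ ys : List Int, xs.length ≤ ys.length →
      pvInterleave xs ys =
        (xs.zip ys).flatMap (fun p => [p.1, p.2]) ++ ys.drop xs.length := by
  induction xs with
  | nil => intro ys _; simp [pvInterleave]
  | cons x xs ih =>
    intro ys h
    cases ys with
    | nil => simp at h
    | cons y ys =>
      have hlen : xs.length ≤ ys.length := by simpa using h
      simp only [pvInterleave, List.zip_cons_cons, List.flatMap_cons, List.length_cons,
        List.drop_succ_cons]
      simp [ih ys hlen]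

theorem drop_pyRange_neg_one (k : Nat) : ∀ (a b : Int),
    (PySem.List.pyRange a b (-1)).drop k = PySem.List.pyRange (a - k) b (-1) := by
  induction k with
  | zero => intro a b; simp
  | succ k ih =>
    intro a b
    by_cases h : b < a
    · rw [PySem.List.pyRange_neg_one_cons h, List.drop_succ_cons, ih (a - 1) b]
      congr 1; push_cast; ring
    · rw [PySem.List.pyRange_neg_one_eq_nil (by omega),
        PySem.List.pyRange_neg_one_eq_nil (by push_cast; omega)]
      simp

theorem drop_pyRange_one (k : Nat) : ∀ (a b : Int),
    (PySem.List.pyRange a b 1).drop k = PySem.List.pyRange (a + k) b 1 := by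
  induction k with
  | zero => intro a b; simp
  | succ k ih =>
    intro a b
    by_cases h : a < b
    · rw [PySem.List.pyRange_one_cons h, List.drop_succ_cons, ih (a + 1) b]
      congr 1; push_cast; ring
    · rw [PySem.List.pyRange_one_eq_nil (by omega),
        PySem.List.pyRange_one_eq_nil (by push_cast; omega)]
      simp


theorem zip_self_pv {α : Type} (l : List α) : l.zip l = l.map (fun x => (x, x)) := by
  induction l with
  | nil => rfl
  | cons x xs ih => simp [ih]

theorem zip_range_le (n : Nat) : ∀ m : Nat, n ≤ m →
    (List.range n).zip (List.range m) = (List.range n).map (fun i => (i, i)) := by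
  intro m h
  rw [show m = n + (m - n) by omega, List.range_add,
    show (List.range n).zip (List.range n ++ (List.range (m - n)).map (n + ·))
       = ((List.range n) ++ []).zip (List.range n ++ (List.range (m - n)).map (n + ·)) by simp,
    List.zip_append (by simp), zip_self_pv]
  simp

theorem zip_flat_ranges (f g : Nat → Int) (n m : Nat) (h : n ≤ m) :
    (((List.range n).map f).zip ((List.range m).map g)).flatMap (fun p => [p.1, p.2])
      = (List.range n).flatMap (fun k => [f k, g k]) := by
  rw [List.zip_map, zip_range_le n m h, List.map_map, List.flatMap_map]
  rfl

theorem flatMap_congr_mem {α β : Type} (l : List α) (f g : α → List β)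
    (h : ∀ x ∈ l, f x = g x) : l.flatMap f = l.flatMap g := by
  induction l with
  | nil => rfl
  | cons x xs ih =>
    simp only [List.flatMap_cons]
    rw [h x (by simp), ih (fun y hy => h y (by simp [hy]))]

theorem map_eq_flatMap_pv {α β : Type} (f : α → β) (l : List α) :
    l.map f = l.flatMap (fun x => [f x]) := by
  induction l <;> simp [*]

theorem pos_case (mv st : Int) (h0 : 0 ≤ st) (h1 : st < mv) (hdir : mv - st - 1 < st) :
    (PySem.List.pyRange 1 (max (mv - st - 1) st + 1) 1).foldl
      (fun acc d =>
        let acc := if st + d < mv then acc ++ [st + d] else acc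
        if st - d ≥ 0 then acc ++ [st - d] else acc) [st]
    = st :: pvInterleave (PySem.List.pyRange (st + 1) mv 1)
        (PySem.List.pyRange (st - 1) (-1) (-1)) := by
  have hfun : (fun (acc : List Int) (d : Int) =>
        let acc := if st + d < mv then acc ++ [st + d] else acc
        if st - d ≥ 0 then acc ++ [st - d] else acc)
      = (fun acc d => acc ++ ((if st + d < mv then [st + d] else []) ++
           (if st - d ≥ 0 then [st - d] else []))) := by
    funext acc d; dsimp only; split_ifs <;> simp
  rw [hfun, PySem.List.foldl_append_eq_flatMap,
      show max (mv - st - 1) st = st by omega,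
      PySem.List.pyRange_one_append 1 (mv - st) (st + 1) (by omega) (by omega),
      List.flatMap_append]
  have hlen : (PySem.List.pyRange (st + 1) mv 1).length ≤
      (PySem.List.pyRange (st - 1) (-1) (-1)).length := by
    rw [PySem.List.length_pyRange_one, PySem.List.length_pyRange_neg_one]; omega
  rw [pvInterleave_eq _ _ hlen, PySem.List.length_pyRange_one, drop_pyRange_neg_one]
  have e1 : (PySem.List.pyRange 1 (mv - st) 1).flatMap
      (fun d => (if st + d < mv then [st + d] else []) ++ (if st - d ≥ 0 then [st - d] else []))
      = ((PySem.List.pyRange (st + 1) mv 1).zip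
          (PySem.List.pyRange (st - 1) (-1) (-1))).flatMap (fun p => [p.1, p.2]) := by
    rw [PySem.List.pyRange_one, PySem.List.pyRange_one, PySem.List.pyRange_neg_one,
      zip_flat_ranges _ _ _ _ (by omega), List.flatMap_map,
      show (mv - (st + 1)).toNat = ((mv - st) - 1).toNat by omega]
    apply flatMap_congr_mem
    intro k hk
    simp only [List.mem_range] at hk
    have h1 : st + (1 + (k : Int)) < mv := by omega
    have h2 : st - (1 + (k : Int)) ≥ 0 := by omega
    simp only [if_pos h1, if_pos h2, List.singleton_append,
      List.cons.injEq, and_true]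
    exact ⟨by omega, by omega⟩
  have e2 : (PySem.List.pyRange (mv - st) (st + 1) 1).flatMap
      (fun d => (if st + d < mv then [st + d] else []) ++ (if st - d ≥ 0 then [st - d] else []))
      = PySem.List.pyRange (st - 1 - ((mv - (st + 1)).toNat : Int)) (-1) (-1) := by
    rw [PySem.List.pyRange_one, PySem.List.pyRange_neg_one, List.flatMap_map]
    rw [show ((st + 1) - (mv - st)).toNat = ((st - 1 - ((mv - (st + 1)).toNat : Int)) - (-1)).toNat by omega,
      map_eq_flatMap_pv]
    apply flatMap_congr_mem
    intro k hk
    simp only [List.mem_range] at hk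
    have h1 : ¬ st + (mv - st + (k : Int)) < mv := by omega
    have h2 : st - (mv - st + (k : Int)) ≥ 0 := by omega
    simp only [if_neg h1, if_pos h2, List.nil_append,
      List.cons.injEq, and_true]
    omega
  rw [e1, e2]
  simp

theorem neg_case (mv st : Int) (h0 : 0 ≤ st) (h1 : st < mv) (hdir : ¬ mv - st - 1 < st) :
    (PySem.List.pyRange 1 (max (mv - st - 1) st + 1) 1).foldl
      (fun acc d =>
        let acc := if st - d ≥ 0 then acc ++ [st - d] else acc
        if st + d < mv then acc ++ [st + d] else acc) [st]
    = st :: pvInterleave (PySem.List.pyRange (st - 1) (-1) (-1))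
        (PySem.List.pyRange (st + 1) mv 1) := by
  have hfun : (fun (acc : List Int) (d : Int) =>
        let acc := if st - d ≥ 0 then acc ++ [st - d] else acc
        if st + d < mv then acc ++ [st + d] else acc)
      = (fun acc d => acc ++ ((if st - d ≥ 0 then [st - d] else []) ++
           (if st + d < mv then [st + d] else []))) := by
    funext acc d; dsimp only; split_ifs <;> simp
  rw [hfun, PySem.List.foldl_append_eq_flatMap,
      show max (mv - st - 1) st = mv - st - 1 by omega,
      PySem.List.pyRange_one_append 1 (st + 1) (mv - st - 1 + 1) (by omega) (by omega),
      List.flatMap_append]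
  have hlen : (PySem.List.pyRange (st - 1) (-1) (-1)).length ≤
      (PySem.List.pyRange (st + 1) mv 1).length := by
    rw [PySem.List.length_pyRange_one, PySem.List.length_pyRange_neg_one]; omega
  rw [pvInterleave_eq _ _ hlen, PySem.List.length_pyRange_neg_one, drop_pyRange_one]
  have e1 : (PySem.List.pyRange 1 (st + 1) 1).flatMap
      (fun d => (if st - d ≥ 0 then [st - d] else []) ++ (if st + d < mv then [st + d] else []))
      = ((PySem.List.pyRange (st - 1) (-1) (-1)).zip
          (PySem.List.pyRange (st + 1) mv 1)).flatMap (fun p => [p.1, p.2]) := by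
    rw [PySem.List.pyRange_one, PySem.List.pyRange_one, PySem.List.pyRange_neg_one,
      zip_flat_ranges _ _ _ _ (by omega), List.flatMap_map,
      show (st - 1 - -1).toNat = ((st + 1) - 1).toNat by omega]
    apply flatMap_congr_mem
    intro k hk
    simp only [List.mem_range] at hk
    have h1 : st - (1 + (k : Int)) ≥ 0 := by omega
    have h2 : st + (1 + (k : Int)) < mv := by omega
    simp only [if_pos h1, if_pos h2, List.singleton_append, List.cons.injEq, and_true]
    exact ⟨by omega, by omega⟩
  have e2 : (PySem.List.pyRange (st + 1) (mv - st - 1 + 1) 1).flatMap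
      (fun d => (if st - d ≥ 0 then [st - d] else []) ++ (if st + d < mv then [st + d] else []))
      = PySem.List.pyRange (st + 1 + ((st - 1 - -1).toNat : Int)) mv 1 := by
    rw [PySem.List.pyRange_one, PySem.List.pyRange_one, List.flatMap_map,
      show ((mv - st - 1 + 1) - (st + 1)).toNat = (mv - (st + 1 + ((st - 1 - -1).toNat : Int))).toNat by omega,
      map_eq_flatMap_pv]
    apply flatMap_congr_mem
    intro k hk
    simp only [List.mem_range] at hk
    have h1 : ¬ st - (st + 1 + (k : Int)) ≥ 0 := by omega
    have h2 : st + (st + 1 + (k : Int)) < mv := by omega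
    simp only [if_neg h1, if_pos h2, List.nil_append, List.cons.injEq, and_true]
    omega
  rw [e1, e2]
  simp

-- ===== VERDICT (by name: the statement is the Claim_ definition above) =====
theorem zig_zag_range_spec : Claim_equal_zig_zag_range := by
  intro mv st _ hpre
  unfold Spec_zig_zag_range zig_zag_range zig_zag_range_alt
  by_cases h0 : mv = 0
  · simp [h0]
  · have hlt : 0 ≤ st ∧ st < mv := by
      rcases hpre with h | h
      · exact absurd h h0
      · exact h
    obtain ⟨hst0, hstm⟩ := hlt
    rw [if_neg h0, if_neg (by omega), if_neg h0, if_neg (by omega)]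
    by_cases hdir : mv - st - 1 < st
    · simpa [hdir] using pos_case mv st hst0 hstm hdir
    · simpa [hdir] using neg_case mv st hst0 hstm hdir
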